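-- pv_equiv track=rewrite | github.com/hmtmcse-com/py-code-hub | py_code_hub/character/split_number.py | split_number_math
-- ===== SOURCE A (Python) =====
-- def split_number_math(num: int):
--     parts = []
--
--     last_two = num % 100  # last two digits
--     leading = num // 100  # remaining part
--
--     # Process leading part digits
--     place = 1
--     while place <= leading:
--         place *= 10
--     place //= 10
--
--     while place > 0:
--         digit = leading // place
--         if digit != 0:
--             parts.append(digit * place * 100)
--         leading %= place
--         place //= 10
--
--     # Add last two digits if not zero
--     if last_two != 0:
--         parts.append(last_two)
--
--     # If parts empty (like num < 100), return num as is
--     if not parts: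
--         return [num]
--
--     return parts
-- ===== SOURCE B (Python) =====
-- def split_number_math(num: int):
--     last_two = num % 100
--     leading = num // 100
--     parts = []
--     place = 100
--     while leading > 0:
--         leading, digit = divmod(leading, 10)
--         if digit:
--             parts.append(digit * place)
--         place *= 10
--     parts.reverse()
--     if last_two != 0:
--         parts.append(last_two)
--     return parts if parts else [num]
-- ===== Notes on version B (the rewrite author's own statement) =====
-- stated objective: alternative
-- what changed: B peels the leading part's digits from the low end with divmod (multiplying the place factor up as it goes) and reverses the collected terms, instead of A's two loops that first multiply up to find the highest power of ten and then peel digits from the high end by repeated division and remainder.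
import Mathlib
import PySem

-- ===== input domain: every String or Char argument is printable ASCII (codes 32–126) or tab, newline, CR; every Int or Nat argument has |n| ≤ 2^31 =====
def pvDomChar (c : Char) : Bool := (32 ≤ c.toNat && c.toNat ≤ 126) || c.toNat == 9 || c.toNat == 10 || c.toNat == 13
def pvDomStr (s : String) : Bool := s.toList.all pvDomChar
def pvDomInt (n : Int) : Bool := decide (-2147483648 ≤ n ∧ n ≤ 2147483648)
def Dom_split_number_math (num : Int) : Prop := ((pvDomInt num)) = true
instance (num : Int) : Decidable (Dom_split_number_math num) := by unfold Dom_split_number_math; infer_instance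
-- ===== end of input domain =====

-- B replaces A's two-loop high-end digit peeling (find highest power, then divide down) by one
-- low-end divmod pass whose collected terms are reversed at the end (objective: alternative).

-- ===== PORT A =====
-- first while loop of A: place *= 10 while place <= leading  (hp records place > 0, invariant of A's loop)
def pvFindPlace (leading : Int) (place : Int) (hp : 0 < place) : Int :=
  if place ≤ leading then
    pvFindPlace leading (place * 10) (by positivity)
  else place
termination_by (leading + 1 - place).toNat
decreasing_by
  have : place < place * 10 := by nlinarith
  omega


-- second while loop of A: peel the highest digit by // and %, dividing place down
def pvALoop (leading place : Int) (parts : List Int) : List Int :=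
  if 0 < place then
    let digit := PySem.Int.floordiv leading place
    pvALoop (PySem.Int.mod leading place) (PySem.Int.floordiv place 10)
      (if digit ≠ 0 then parts ++ [digit * place * 100] else parts)
  else parts
termination_by place.toNat
decreasing_by
  rw [PySem.Int.floordiv_eq_ediv_of_pos (by norm_num)]
  omega

def split_number_math (num : Int) : List Int :=
  let last_two := PySem.Int.mod num 100
  let leading := PySem.Int.floordiv num 100
  let place := PySem.Int.floordiv (pvFindPlace leading 1 (by norm_num)) 10
  let parts := pvALoop leading place []
  let parts := if last_two ≠ 0 then parts ++ [last_two] else parts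
  if parts = [] then [num] else parts

-- ===== PORT B =====
-- B's single loop: divmod(leading, 10), collect nonzero digit*place, place *= 10  (divisor 10 ≠ 0, floordiv/mod exact)
def pvBLoop (leading place : Int) (parts : List Int) : List Int :=
  if 0 < leading then
    let digit := PySem.Int.mod leading 10
    pvBLoop (PySem.Int.floordiv leading 10) (place * 10)
      (if digit ≠ 0 then parts ++ [digit * place] else parts)
  else parts
termination_by leading.toNat
decreasing_by
  rw [PySem.Int.floordiv_eq_ediv_of_pos (by norm_num)]
  omega

def split_number_math_alt (num : Int) : List Int :=
  let last_two := PySem.Int.mod num 100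
  let leading := PySem.Int.floordiv num 100
  let parts := (pvBLoop leading 100 []).reverse
  let parts := if last_two ≠ 0 then parts ++ [last_two] else parts
  if parts = [] then [num] else parts

-- ===== PRECONDITION & SPEC =====
def Spec_split_number_math (num : Int) (out : List Int) : Prop := out = split_number_math_alt num
instance (num : Int) (out : List Int) : Decidable (Spec_split_number_math num out) := by unfold Spec_split_number_math; infer_instance

-- ===== CLAIM (what is proved, stated in full; the proofs are below) =====
def Claim_equal_split_number_math : Prop := ∀ (num : Int), Dom_split_number_math num → Spec_split_number_math num (split_number_math num)

-- ===== LEMMAS AND PROOFS =====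

-- low-first digit decomposition: digit j (from the low end) of n contributes ↑(digit) * (mult * 10^j)
def pvDigitsN (n : Nat) (mult : Int) : List Int :=
  if n = 0 then []
  else pvDigitsN (n / 10) (mult * 10) ++
    (if n % 10 ≠ 0 then [((n % 10 : Nat) : Int) * mult] else [])
termination_by n
decreasing_by omega

theorem pvDigitsN_unfold (n : Nat) (mult : Int) :
    pvDigitsN n mult = pvDigitsN (n / 10) (mult * 10) ++
      (if n % 10 ≠ 0 then [((n % 10 : Nat) : Int) * mult] else []) := by
  by_cases h : n = 0
  · subst h; simp [pvDigitsN]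
  · rw [pvDigitsN]; simp [h]

theorem pvDigitsN_small (d : Nat) (mult : Int) (h : d < 10) :
    pvDigitsN d mult = if d ≠ 0 then [(d : Int) * mult] else [] := by
  rw [pvDigitsN_unfold]
  have h1 : d / 10 = 0 := by omega
  have h2 : d % 10 = d := by omega
  rw [h1, h2]
  simp [pvDigitsN]

theorem pvDigitsN_split (K : Nat) : ∀ (m : Nat) (mult : Int), m < 10 ^ (K + 1) * 10 →
    pvDigitsN m mult =
      (if m / 10 ^ (K + 1) ≠ 0 then
        [((m / 10 ^ (K + 1) : Nat) : Int) * (((10 ^ (K + 1) : Nat) : Int) * mult)] else []) ++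
      pvDigitsN (m % 10 ^ (K + 1)) mult := by
  induction K with
  | zero =>
    intro m mult hm
    simp only [Nat.zero_add, pow_one] at *
    rw [pvDigitsN_unfold, pvDigitsN_small (m / 10) (mult * 10) (by omega),
        pvDigitsN_small (m % 10) mult (by omega)]
    have hc : mult * 10 = ((10 : Nat) : Int) * mult := by push_cast; ring
    rw [hc]
  | succ K ih =>
    intro m mult hm
    have hP : (10 : Nat) ^ (K + 1 + 1) = 10 * 10 ^ (K + 1) := by ring
    have hdiv : m / 10 < 10 ^ (K + 1) * 10 := by rw [hP] at hm; omega
    rw [pvDigitsN_unfold, ih (m / 10) (mult * 10) hdiv]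
    have f1 : m / 10 / 10 ^ (K + 1) = m / 10 ^ (K + 1 + 1) := by
      rw [Nat.div_div_eq_div_mul, ← hP]
    have f2 : m / 10 % 10 ^ (K + 1) = m % 10 ^ (K + 1 + 1) / 10 := by
      rw [← Nat.mod_mul_right_div_self m 10 (10 ^ (K + 1)), ← hP]
    have f3 : m % 10 = m % 10 ^ (K + 1 + 1) % 10 := (Nat.mod_mod_of_dvd m ⟨10 ^ (K + 1), hP⟩).symm
    have fc : ((10 ^ (K + 1) : Nat) : Int) * (mult * 10) = ((10 ^ (K + 1 + 1) : Nat) : Int) * mult := by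
      push_cast; ring
    rw [f1, f2, f3, fc, pvDigitsN_unfold (m % 10 ^ (K + 1 + 1)) mult]
    simp [List.append_assoc]

theorem pvBLoop_eq (m : Nat) : ∀ (place : Int) (parts : List Int),
    pvBLoop (m : Int) place parts = parts ++ (pvDigitsN m place).reverse := by
  induction m using Nat.strong_induction_on with
  | _ m ih =>
    intro place parts
    by_cases h : m = 0
    · subst h; rw [pvBLoop]; simp [pvDigitsN]
    · have hm : (0 : Int) < (m : Int) := by exact_mod_cast Nat.pos_of_ne_zero h
      rw [pvBLoop, if_pos hm]
      have hd : PySem.Int.floordiv (m : Int) 10 = ((m / 10 : Nat) : Int) := by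
        rw [PySem.Int.floordiv_eq_ediv_of_pos (by norm_num)]; omega
      have hmod : PySem.Int.mod (m : Int) 10 = ((m % 10 : Nat) : Int) := by
        rw [PySem.Int.mod_eq_emod_of_pos (by norm_num)]; omega
      simp only [hd, hmod]
      rw [ih (m / 10) (by omega) (place * 10), pvDigitsN_unfold m place]
      by_cases hz : m % 10 = 0
      · simp [hz]
      · have hdvd : ¬ ((10 : Int) ∣ (m : Int)) := by omega
        simp [hz, hdvd]

theorem pvPowDiv10 (K : Nat) :
    PySem.Int.floordiv ((10 ^ (K + 1) : Nat) : Int) 10 = ((10 ^ K : Nat) : Int) := by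
  have h2 : ((10 ^ (K + 1) : Nat) : Int) = ((10 ^ K : Nat) : Int) * 10 := by push_cast; ring
  rw [PySem.Int.floordiv_eq_ediv_of_pos (by norm_num), h2, Int.mul_ediv_cancel _ (by norm_num)]

theorem pvALoop_eq (K : Nat) : ∀ (m : Nat) (parts : List Int), m < 10 ^ (K + 1) →
    pvALoop (m : Int) ((10 ^ K : Nat) : Int) parts = parts ++ pvDigitsN m 100 := by
  induction K with
  | zero =>
    intro m parts hm
    simp only [pow_zero, Nat.cast_one] at *
    rw [pvALoop, if_pos (by norm_num)]
    have hd : PySem.Int.floordiv (m : Int) 1 = (m : Int) := by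
      rw [PySem.Int.floordiv_eq_ediv_of_pos (by norm_num)]; omega
    have hmod : PySem.Int.mod (m : Int) 1 = 0 := by
      rw [PySem.Int.mod_eq_emod_of_pos (by norm_num)]; omega
    have h110 : PySem.Int.floordiv (1 : Int) 10 = 0 := by
      rw [PySem.Int.floordiv_eq_ediv_of_pos (by norm_num)]; decide
    simp only [hd, hmod, h110]
    rw [pvALoop, if_neg (by norm_num)]
    rw [pvDigitsN_small m 100 (by omega)]
    by_cases hz : m = 0
    · simp [hz]
    · simp [hz]
  | succ K ih =>
    intro m parts hm
    have hpos : (0 : Int) < ((10 ^ (K + 1) : Nat) : Int) := by positivity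
    rw [pvALoop, if_pos hpos]
    have hd : PySem.Int.floordiv (m : Int) ((10 ^ (K + 1) : Nat) : Int)
        = ((m / 10 ^ (K + 1) : Nat) : Int) := by
      exact_mod_cast PySem.Int.floordiv_natCast m (10 ^ (K + 1))
    have hmod : PySem.Int.mod (m : Int) ((10 ^ (K + 1) : Nat) : Int)
        = ((m % 10 ^ (K + 1) : Nat) : Int) := by
      exact_mod_cast PySem.Int.mod_natCast m (10 ^ (K + 1))
    simp only [hd, hmod, pvPowDiv10 K]
    rw [ih (m % 10 ^ (K + 1)) _ (Nat.mod_lt _ (pow_pos (by norm_num) _))]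
    have hb : m < 10 ^ (K + 1) * 10 := by
      have h : (10 : Nat) ^ (K + 1) * 10 = 10 ^ (K + 1 + 1) := by ring
      omega
    rw [pvDigitsN_split K m 100 hb]
    by_cases hz : m / 10 ^ (K + 1) = 0
    · simp [hz]
    · have hz' : ((m / 10 ^ (K + 1) : Nat) : Int) ≠ 0 := Nat.cast_ne_zero.mpr hz
      rw [if_pos hz', if_pos hz]
      simp [mul_assoc]

theorem pvFindPlace_congr (l p p' : Int) (hp : 0 < p) (hp' : 0 < p') (h : p = p') :
    pvFindPlace l p hp = pvFindPlace l p' hp' := by subst h; rfl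

theorem pvFindPlace_eq (d : Nat) : ∀ (j K m : Nat) (hp : 0 < (((10 : Nat) ^ j : Nat) : Int)),
    10 ^ K ≤ m → m < 10 ^ (K + 1) → j + d = K + 1 →
    pvFindPlace (m : Int) (((10 : Nat) ^ j : Nat) : Int) hp = (((10 : Nat) ^ (K + 1) : Nat) : Int) := by
  induction d with
  | zero =>
    intro j K m hp hle hlt hjd
    have hj : j = K + 1 := by omega
    subst hj
    rw [pvFindPlace, if_neg (by exact_mod_cast Nat.not_le.mpr hlt)]
  | succ d ih =>
    intro j K m hp hle hlt hjd
    have hjK : j ≤ K := by omega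
    have hle' : ((10 ^ j : Nat) : Int) ≤ (m : Int) := by
      exact_mod_cast le_trans (Nat.pow_le_pow_right (by norm_num) hjK) hle
    rw [pvFindPlace, if_pos hle']
    have hpp : ((10 ^ j : Nat) : Int) * 10 = ((10 ^ (j + 1) : Nat) : Int) := by push_cast; ring
    exact (pvFindPlace_congr (m : Int) (((10 ^ j : Nat) : Int) * 10) (((10 ^ (j + 1) : Nat) : Int))
        (by positivity) (by positivity) hpp).trans
      (ih (j + 1) K m (by positivity) hle hlt (by omega))

theorem pvMid_eq (ld : Int) (hp : (0 : Int) < 1) :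
    pvALoop ld (PySem.Int.floordiv (pvFindPlace ld 1 hp) 10) []
      = (pvBLoop ld 100 []).reverse := by
  by_cases hpos : 0 < ld
  · obtain ⟨m, hm⟩ : ∃ m : Nat, ld = (m : Int) :=
      ⟨ld.toNat, (Int.toNat_of_nonneg (le_of_lt hpos)).symm⟩
    subst hm
    have hm0 : m ≠ 0 := by exact_mod_cast hpos.ne' 
    have h1 : 10 ^ Nat.log 10 m ≤ m := Nat.pow_log_le_self 10 hm0
    have h2 : m < 10 ^ (Nat.log 10 m + 1) := Nat.lt_pow_succ_log_self (by norm_num) m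
    have e1 := pvFindPlace_eq (Nat.log 10 m + 1) 0 (Nat.log 10 m) m (by norm_num) h1 h2 (by omega)
    have e0 : pvFindPlace (m : Int) 1 hp
        = pvFindPlace (m : Int) (((10 : Nat) ^ 0 : Nat) : Int) (by norm_num) :=
      pvFindPlace_congr (m : Int) 1 (((10 : Nat) ^ 0 : Nat) : Int) hp (by norm_num) (by norm_num)
    have hfp : pvFindPlace (m : Int) 1 hp = ((10 ^ (Nat.log 10 m + 1) : Nat) : Int) := e0.trans e1
    rw [hfp, pvPowDiv10, pvALoop_eq (Nat.log 10 m) m [] h2, pvBLoop_eq m 100 []]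
    simp
  · rw [pvFindPlace, if_neg (by omega)]
    have h110 : PySem.Int.floordiv (1 : Int) 10 = 0 := by
      rw [PySem.Int.floordiv_eq_ediv_of_pos (by norm_num)]; decide
    rw [h110, pvALoop, if_neg (by norm_num), pvBLoop, if_neg hpos]
    rfl

-- ===== VERDICT (by name: the statement is the Claim_ definition above) =====
theorem split_number_math_spec : Claim_equal_split_number_math := by
  intro num _
  unfold Spec_split_number_math split_number_math split_number_math_alt
  simp only [pvMid_eq]
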